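-- pv_equiv track=rewrite | github.com/malcolm-cephas/Learning-Coding | Python/artificial intelligence/WaterJugAI.py | water_jug
-- ===== SOURCE A (Python) =====
-- def water_jug(a, b, target):
--     visited = set()
--     queue = [(0, 0)]
--     while queue:
--         ca, cb = queue.pop(0)
--         if (ca, cb) in visited: continue
--         visited.add((ca, cb))
--         if ca == target or cb == target: return True
--
--         queue.extend([(a, cb), (ca, b), (0, cb), (ca, 0), (max(0, ca-(b-cb)), min(b, cb+ca)), (min(a, ca+cb), max(0, cb-(a-ca)))])
--     return False
-- ===== SOURCE B (Python) =====
-- def water_jug(a, b, target):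
--     if target == 0:
--         return True
--     x, y = a, b
--     while y:
--         x, y = y, x % y
--     return 0 < target <= max(a, b) and target % x == 0
-- ===== Notes on version B (the rewrite author's own statement) =====
-- stated objective: faster
-- what changed: Replaced the O(a*b) BFS over jug states by the classical number-theoretic characterisation: the target is measurable iff it is 0 or a positive multiple of gcd(a,b) not exceeding max(a,b), with gcd computed by Euclid's algorithm.
-- outside the precondition, e.g. on water_jug(-2, 3, -1): A returns True, B returns False
import Mathlib
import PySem

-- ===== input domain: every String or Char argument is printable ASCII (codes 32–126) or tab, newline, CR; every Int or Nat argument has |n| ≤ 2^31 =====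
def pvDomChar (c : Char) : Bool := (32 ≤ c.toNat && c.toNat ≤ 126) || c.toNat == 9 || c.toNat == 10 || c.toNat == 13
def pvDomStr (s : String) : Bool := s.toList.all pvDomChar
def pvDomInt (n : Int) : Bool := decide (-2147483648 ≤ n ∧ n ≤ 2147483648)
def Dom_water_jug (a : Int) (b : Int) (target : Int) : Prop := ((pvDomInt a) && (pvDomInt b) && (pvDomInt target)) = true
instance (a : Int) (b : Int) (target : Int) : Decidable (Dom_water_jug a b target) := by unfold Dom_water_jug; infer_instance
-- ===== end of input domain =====

-- B replaces A's O(a*b) breadth-first search over jug states by the gcd characterisation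
-- of measurable amounts (Euclid's algorithm); equality is proved for nonnegative capacities (Pre_).

-- ===== PORT A =====
-- the six successor states Python builds in queue.extend([...])
def pvKids (a : Int) (b : Int) (s : Int × Int) : List (Int × Int) :=
  [(a, s.2), (s.1, b), (0, s.2), (s.1, 0),
   (max 0 (s.1 - (b - s.2)), min b (s.2 + s.1)),
   (min a (s.1 + s.2), max 0 (s.2 - (a - s.1)))]

-- the while loop: pop(0), skip visited, mark, test target, extend.  The fuel argument only
-- makes the recursion structural; water_jug passes enough fuel for the loop to finish
-- (each popped fresh state pushes 6 children, and all states lie in [0,a]×[0,b]).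
def pvBfs (a : Int) (b : Int) (target : Int) : Nat → PySem.Set (Int × Int) → List (Int × Int) → Bool
  | _, _, [] => false
  | 0, _, _ :: _ => false
  | fuel+1, visited, s :: queue =>
    if s ∈ visited then pvBfs a b target fuel visited queue
    else
      let visited' := PySem.Set.add visited s
      if s.1 = target ∨ s.2 = target then true
      else pvBfs a b target fuel visited' (queue ++ pvKids a b s)

def water_jug (a : Int) (b : Int) (target : Int) : Bool :=
  pvBfs a b target (((a + 1) * (b + 1)).toNat * 6 + 1) PySem.Set.empty [(0, 0)]

-- ===== PORT B =====
-- |x % y| < |y| for y ≠ 0 (Python %): termination of the Euclid loop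
theorem pvMod_natAbs_lt (x y : Int) (hy : y ≠ 0) : (PySem.Int.mod x y).natAbs < y.natAbs := by
  rcases lt_or_gt_of_ne hy with h | h
  · have h1 := PySem.Int.mod_neg_bounds (a := x) h
    omega
  · have h1 := PySem.Int.mod_nonneg (a := x) h
    have h2 := PySem.Int.mod_lt (a := x) h
    omega

-- 'x, y = a, b; while y: x, y = y, x % y'
def pvGcdLoop (x : Int) (y : Int) : Int :=
  if hy : y = 0 then x else pvGcdLoop y (PySem.Int.mod x y)
termination_by y.natAbs
decreasing_by exact pvMod_natAbs_lt x y hy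

def water_jug_alt (a : Int) (b : Int) (target : Int) : Bool :=
  if target = 0 then true
  else (decide (0 < target) && decide (target ≤ max a b))
        && (PySem.Int.mod target (pvGcdLoop a b) == 0)

-- ===== PRECONDITION & SPEC =====
-- Pre_ restricts to nonnegative jug capacities: with a negative capacity the BFS state space is
-- unbounded, so A either diverges or (when the exploration happens to hit the target first)
-- returns True on states no two-jug problem has; B treats such targets as unmeasurable.
def Pre_water_jug (a : Int) (b : Int) (target : Int) : Prop := 0 ≤ a ∧ 0 ≤ b
instance (a : Int) (b : Int) (target : Int) : Decidable (Pre_water_jug a b target) := by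
  unfold Pre_water_jug; infer_instance

def pvWitness_water_jug : Int × Int × Int := (3, 5, 4)

def Spec_water_jug (a : Int) (b : Int) (target : Int) (out : Bool) : Prop := out = water_jug_alt a b target
instance (a : Int) (b : Int) (target : Int) (out : Bool) : Decidable (Spec_water_jug a b target out) := by unfold Spec_water_jug; infer_instance

-- ===== CLAIM (what is proved, stated in full; the proofs are below) =====
def Claim_equal_water_jug : Prop := ∀ (a : Int) (b : Int) (target : Int), Dom_water_jug a b target → Pre_water_jug a b target → Spec_water_jug a b target (water_jug a b target)

-- ===== LEMMAS AND PROOFS =====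

-- reachability in A's search graph, from the start state (0,0)
def pvReach (a : Int) (b : Int) (s : Int × Int) : Prop :=
  Relation.ReflTransGen (fun u v => v ∈ pvKids a b u) (0, 0) s

theorem pvReach_tail {a b : Int} {s t : Int × Int} (h : pvReach a b s)
    (ht : t ∈ pvKids a b s) : pvReach a b t :=
  Relation.ReflTransGen.tail h ht

theorem pvReach_bounds {a b : Int} (ha : 0 ≤ a) (hb : 0 ≤ b) {s : Int × Int}
    (h : pvReach a b s) : 0 ≤ s.1 ∧ s.1 ≤ a ∧ 0 ≤ s.2 ∧ s.2 ≤ b := by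
  induction h with
  | refl => simp; omega
  | tail _ hstep ih =>
    simp only [pvKids, List.mem_cons, List.not_mem_nil, or_false] at hstep
    rcases hstep with h | h | h | h | h | h <;> subst h <;> simp at ih ⊢ <;> omega

theorem pvReach_dvd {a b : Int} {s : Int × Int} (h : pvReach a b s) :
    (Int.gcd a b : Int) ∣ s.1 ∧ (Int.gcd a b : Int) ∣ s.2 := by
  induction h with
  | refl => simp
  | tail _ hstep ih =>
    have hga : (Int.gcd a b : Int) ∣ a := Int.gcd_dvd_left a b
    have hgb : (Int.gcd a b : Int) ∣ b := Int.gcd_dvd_right a b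
    simp only [pvKids, List.mem_cons, List.not_mem_nil, or_false] at hstep
    obtain ⟨ih1, ih2⟩ := ih
    rcases hstep with h | h | h | h | h | h <;> subst h <;> simp
    · exact ⟨hga, ih2⟩
    · exact ⟨ih1, hgb⟩
    · exact ih2
    · exact ih1
    · constructor
      · rcases max_choice (0 : Int) (_ - (b - _)) with h | h <;> rw [h]
        · exact dvd_zero _
        · exact dvd_sub ih1 (dvd_sub hgb ih2)
      · rcases min_choice b (_ + _) with h | h <;> rw [h]
        · exact hgb
        · exact dvd_add ih2 ih1
    · constructor
      · rcases min_choice a (_ + _) with h | h <;> rw [h]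
        · exact hga
        · exact dvd_add ih1 ih2
      · rcases max_choice (0 : Int) (_ - (a - _)) with h | h <;> rw [h]
        · exact dvd_zero _
        · exact dvd_sub ih2 (dvd_sub hga ih1)

-- pouring the a-jug down into the b-jug repeatedly: from (x,0) we can reach (0, x % b)
theorem pvPourDown {a b : Int} (hb : 0 < b) :
    ∀ (n : Nat) (x : Int), x.toNat ≤ n → 0 ≤ x → pvReach a b (x, 0) → pvReach a b (0, x % b) := by
  intro n
  induction n with
  | zero =>
    intro x hxn hx h
    have hx0 : x = 0 := by omega
    subst hx0
    simpa using h
  | succ n ih =>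
    intro x hxn hx h
    by_cases hxb : x < b
    · have : x % b = x := Int.emod_eq_of_lt hx hxb
      rw [this]
      have h2 := pvReach_tail h (t := (max 0 (x - (b - 0)), min b (0 + x))) (by simp [pvKids])
      have e1 : max 0 (x - (b - 0)) = 0 := by omega
      have e2 : min b (0 + x) = x := by omega
      rwa [e1, e2] at h2
    · have h2 := pvReach_tail h (t := (max 0 (x - (b - 0)), min b (0 + x))) (by simp [pvKids])
      have e1 : max 0 (x - (b - 0)) = x - b := by omega
      have e2 : min b (0 + x) = b := by omega
      rw [e1, e2] at h2
      have h3 := pvReach_tail h2 (t := (x - b, 0)) (by simp [pvKids])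
      have h4 := ih (x - b) (by omega) (by omega) h3
      have : (x - b) % b = x % b := by
        rw [Int.sub_emod, Int.emod_self, sub_zero, Int.emod_emod_of_dvd _ dvd_rfl]
      rwa [this] at h4

-- one more fill of the a-jug: from (0,r) we can reach (0, (r+a) % b)
theorem pvAddA {a b : Int} (ha : 0 ≤ a) (hb : 0 < b) {r : Int} (hr0 : 0 ≤ r) (hrb : r < b)
    (h : pvReach a b (0, r)) : pvReach a b (0, (r + a) % b) := by
  have h1 := pvReach_tail h (t := (a, r)) (by simp [pvKids])
  have h2 := pvReach_tail h1 (t := (max 0 (a - (b - r)), min b (r + a))) (by simp [pvKids])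
  by_cases hc : r + a ≤ b
  · have e1 : max 0 (a - (b - r)) = 0 := by omega
    rw [e1] at h2
    by_cases he : r + a = b
    · have e2 : min b (r + a) = b := by omega
      rw [e2] at h2
      have h3 := pvReach_tail h2 (t := ((0 : Int), (0 : Int))) (by simp [pvKids])
      have : (r + a) % b = 0 := by rw [he, Int.emod_self]
      rwa [this]
    · have e2 : min b (r + a) = r + a := by omega
      rw [e2] at h2
      have : (r + a) % b = r + a := Int.emod_eq_of_lt (by omega) (by omega)
      rwa [this]
  · have e1 : max 0 (a - (b - r)) = r + a - b := by omega
    have e2 : min b (r + a) = b := by omega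
    rw [e1, e2] at h2
    have h3 := pvReach_tail h2 (t := (r + a - b, 0)) (by simp [pvKids])
    have h4 := pvPourDown hb (r + a - b).toNat (r + a - b) le_rfl (by omega) h3
    have : (r + a - b) % b = (r + a) % b := by
      rw [Int.sub_emod, Int.emod_self, sub_zero, Int.emod_emod_of_dvd _ dvd_rfl]
    rwa [this] at h4

theorem pvMulA {a b : Int} (ha : 0 ≤ a) (hb : 0 < b) :
    ∀ k : Nat, pvReach a b (0, ((k : Int) * a) % b) := by
  intro k
  induction k with
  | zero => simpa using Relation.ReflTransGen.refl
  | succ k ih =>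
    have h := pvAddA ha hb (Int.emod_nonneg _ (by omega)) (Int.emod_lt_of_pos _ hb) ih
    have : ((k : Int) * a % b + a) % b = (((k : Nat) + 1 : Int) * a) % b := by
      rw [Int.emod_add_emod]
      ring_nf
    rw [this] at h
    exact_mod_cast h

-- every multiple of gcd(a,b) in [0,b) is of the form (k*a) % b
theorem pvHitMod {a b t : Int} (hb : 0 < b) (hg : (Int.gcd a b : Int) ∣ t)
    (ht0 : 0 ≤ t) (htb : t < b) : ∃ k : Nat, ((k : Int) * a) % b = t := by
  obtain ⟨m, hm⟩ := hg
  have hbez := Int.gcd_eq_gcd_ab a b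
  set A := Int.gcdA a b
  set B := Int.gcdB a b
  have ht : t = a * (A * m) + b * (B * m) := by rw [hm, hbez]; ring
  refine ⟨(A * m % b).toNat, ?_⟩
  have hk : ((A * m % b).toNat : Int) = A * m % b :=
    Int.toNat_of_nonneg (Int.emod_nonneg _ (by omega))
  rw [hk]
  have e1 : (A * m % b) * a % b = (A * m) * a % b := by
    rw [Int.mul_emod, Int.emod_emod_of_dvd _ dvd_rfl, ← Int.mul_emod]
  rw [e1]
  have e2 : (A * m) * a % b = t % b := by
    rw [ht]
    have : a * (A * m) + b * (B * m) = A * m * a + b * (B * m) := by ring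
    rw [this, Int.add_mul_emod_self_left]
  rw [e2]
  exact Int.emod_eq_of_lt ht0 htb

-- the problem is symmetric in the two jugs
theorem pvKids_swap {a b : Int} {s t : Int × Int} (h : t ∈ pvKids a b s) :
    (t.2, t.1) ∈ pvKids b a (s.2, s.1) := by
  simp only [pvKids, List.mem_cons, List.not_mem_nil, or_false] at h ⊢
  rcases h with h | h | h | h | h | h <;> subst h <;> simp

theorem pvReach_swap {a b : Int} {s : Int × Int} (h : pvReach a b s) :
    pvReach b a (s.2, s.1) := by
  induction h with
  | refl => exact Relation.ReflTransGen.refl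
  | tail _ hstep ih => exact Relation.ReflTransGen.tail ih (pvKids_swap hstep)

-- completeness: the formula's targets are all reached
theorem pvReachB {a b t : Int} (ha : 0 ≤ a) (hb : 0 < t) (htb : t ≤ b)
    (hg : (Int.gcd a b : Int) ∣ t) : pvReach a b (0, t) := by
  by_cases he : t = b
  · subst he
    exact pvReach_tail Relation.ReflTransGen.refl (by simp [pvKids])
  · obtain ⟨k, hk⟩ := pvHitMod (a := a) (by omega) hg (by omega) (by omega)
    have := pvMulA ha (b := b) (by omega) k
    rwa [hk] at this

theorem pvComplete {a b t : Int} (ha : 0 ≤ a) (hb : 0 ≤ b) (ht0 : 0 < t)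
    (hmax : t ≤ max a b) (hg : (Int.gcd a b : Int) ∣ t) :
    ∃ s, pvReach a b s ∧ (s.1 = t ∨ s.2 = t) := by
  by_cases hcb : t ≤ b
  · exact ⟨(0, t), pvReachB ha ht0 hcb hg, Or.inr rfl⟩
  · have hca : t ≤ a := by omega
    have hg' : (Int.gcd b a : Int) ∣ t := by rwa [Int.gcd_comm]
    have h := pvReachB hb ht0 hca hg'
    have h2 := pvReach_swap h
    exact ⟨(t, 0), h2, Or.inl rfl⟩

-- the finite state space [0,a]×[0,b]
noncomputable def pvU (a b : Int) : Finset (Int × Int) := Finset.Icc 0 a ×ˢ Finset.Icc 0 b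

theorem pvMem_U {a b : Int} {s : Int × Int} :
    s ∈ pvU a b ↔ 0 ≤ s.1 ∧ s.1 ≤ a ∧ 0 ≤ s.2 ∧ s.2 ≤ b := by
  simp [pvU, Finset.mem_product, Finset.mem_Icc]
  tauto

-- if the queue is exhausted, visited is closed, so it contains every reachable state
theorem pvClosed {a b : Int} {visited : List (Int × Int)}
    (hclosed : ∀ s ∈ visited, ∀ c ∈ pvKids a b s, c ∈ visited)
    (hstart : ((0 : Int), (0 : Int)) ∈ visited) {s : Int × Int} (h : pvReach a b s) :
    s ∈ visited := by
  induction h with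
  | refl => exact hstart
  | tail _ hstep ih => exact hclosed _ ih _ hstep

theorem pvBfs_correct {a b t : Int} (ha : 0 ≤ a) (hb : 0 ≤ b) :
    ∀ (fuel : Nat) (visited queue : List (Int × Int)),
      (∀ s ∈ visited, pvReach a b s ∧ s.1 ≠ t ∧ s.2 ≠ t) →
      (∀ s ∈ queue, pvReach a b s) →
      (∀ s ∈ visited, ∀ c ∈ pvKids a b s, c ∈ visited ∨ c ∈ queue) →
      (((0 : Int), (0 : Int)) ∈ visited ∨ ((0 : Int), (0 : Int)) ∈ queue) →
      queue.length + 6 * (pvU a b \ visited.toFinset).card ≤ fuel →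
      (pvBfs a b t fuel visited queue = true ↔ ∃ s, pvReach a b s ∧ (s.1 = t ∨ s.2 = t)) := by
  intro fuel
  induction fuel with
  | zero =>
    intro visited queue hvis hq hclosed hstart hfuel
    have hq0 : queue = [] := by
      cases queue with
      | nil => rfl
      | cons s q => simp at hfuel
    subst hq0
    rw [show pvBfs a b t 0 visited [] = false from rfl]
    simp only [Bool.false_eq_true, false_iff]
    rintro ⟨s, hs, hc⟩
    have hstart' : ((0 : Int), (0 : Int)) ∈ visited := by
      rcases hstart with h | h
      · exact h
      · simp at h
    have hcl : ∀ s ∈ visited, ∀ c ∈ pvKids a b s, c ∈ visited := by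
      intro s' hs' c hc'
      rcases hclosed s' hs' c hc' with h | h
      · exact h
      · simp at h
    have hmem := pvClosed hcl hstart' hs
    obtain ⟨_, h1, h2⟩ := hvis s hmem
    tauto
  | succ n ih =>
    intro visited queue hvis hq hclosed hstart hfuel
    cases queue with
    | nil =>
      rw [show pvBfs a b t (n + 1) visited [] = false from rfl]
      simp only [Bool.false_eq_true, false_iff]
      rintro ⟨s, hs, hc⟩
      have hstart' : ((0 : Int), (0 : Int)) ∈ visited := by
        rcases hstart with h | h
        · exact h
        · simp at h
      have hcl : ∀ s ∈ visited, ∀ c ∈ pvKids a b s, c ∈ visited := by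
        intro s' hs' c hc'
        rcases hclosed s' hs' c hc' with h | h
        · exact h
        · simp at h
      have hmem := pvClosed hcl hstart' hs
      obtain ⟨_, h1, h2⟩ := hvis s hmem
      tauto
    | cons s q =>
      by_cases hsv : s ∈ visited
      · rw [show pvBfs a b t (n + 1) visited (s :: q) = pvBfs a b t n visited q from by
          simp [pvBfs, hsv]]
        apply ih visited q hvis
        · intro s' hs'
          exact hq s' (by simp [hs'])
        · intro s' hs' c hc'
          rcases hclosed s' hs' c hc' with h | h
          · exact Or.inl h
          · rcases List.mem_cons.mp h with rfl | h
            · exact Or.inl hsv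
            · exact Or.inr h
        · rcases hstart with h | h
          · exact Or.inl h
          · rcases List.mem_cons.mp h with rfl | h
            · exact Or.inl hsv
            · exact Or.inr h
        · simp at hfuel
          omega
      · by_cases hts : s.1 = t ∨ s.2 = t
        · rw [show pvBfs a b t (n + 1) visited (s :: q) = true from by
            simp [pvBfs, hsv, hts]]
          simp only [true_iff]
          exact ⟨s, hq s (by simp), hts⟩
        · have hreach : pvReach a b s := hq s (by simp)
          rw [show pvBfs a b t (n + 1) visited (s :: q)
                = pvBfs a b t n (visited ++ [s]) (q ++ pvKids a b s) from by
            simp [pvBfs, hsv, hts]]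
        -- re-establish the invariants for the extended visited set and queue
          apply ih (visited ++ [s]) (q ++ pvKids a b s)
          · intro s' hs'
            rcases List.mem_append.mp hs' with h | h
            · exact hvis s' h
            · have : s' = s := by simpa using h
              subst this
              refine ⟨hreach, ?_, ?_⟩ <;> tauto
          · intro s' hs'
            rcases List.mem_append.mp hs' with h | h
            · exact hq s' (by simp [h])
            · exact pvReach_tail hreach h
          · intro s' hs' c hc'
            rcases List.mem_append.mp hs' with h | h
            · rcases hclosed s' h c hc' with h2 | h2
              · exact Or.inl (List.mem_append.mpr (Or.inl h2))
              · rcases List.mem_cons.mp h2 with rfl | h2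
                · exact Or.inl (List.mem_append.mpr (Or.inr (by simp)))
                · exact Or.inr (List.mem_append.mpr (Or.inl h2))
            · have : s' = s := by simpa using h
              subst this
              exact Or.inr (List.mem_append.mpr (Or.inr hc'))
          · rcases hstart with h | h
            · exact Or.inl (List.mem_append.mpr (Or.inl h))
            · rcases List.mem_cons.mp h with rfl | h
              · exact Or.inl (List.mem_append.mpr (Or.inr (by simp)))
              · exact Or.inr (List.mem_append.mpr (Or.inl h))
          · have hsU : s ∈ pvU a b := pvMem_U.mpr (pvReach_bounds ha hb hreach)
            have hsd : s ∈ pvU a b \ visited.toFinset :=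
              Finset.mem_sdiff.mpr ⟨hsU, by simpa using hsv⟩
            have hpos : 0 < (pvU a b \ visited.toFinset).card :=
              Finset.card_pos.mpr ⟨s, hsd⟩
            have herase : pvU a b \ (visited ++ [s]).toFinset
                = (pvU a b \ visited.toFinset).erase s := by
              ext x
              simp only [Finset.mem_sdiff, Finset.mem_erase, List.mem_toFinset,
                List.mem_append, List.mem_singleton]
              tauto
            have hcard := Finset.card_erase_of_mem hsd
            simp only [herase, hcard, List.length_append, List.length_cons] at hfuel ⊢
            have hk : (pvKids a b s).length = 6 := by simp [pvKids]
            simp only [hk]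
            omega

theorem pvWater_jug_iff {a b t : Int} (ha : 0 ≤ a) (hb : 0 ≤ b) :
    (water_jug a b t = true ↔ ∃ s, pvReach a b s ∧ (s.1 = t ∨ s.2 = t)) := by
  unfold water_jug
  apply pvBfs_correct ha hb
  · intro s hs
    simp [PySem.Set.empty] at hs
  · intro s hs
    have : s = ((0 : Int), (0 : Int)) := by simpa using hs
    subst this
    exact Relation.ReflTransGen.refl
  · intro s hs
    simp [PySem.Set.empty] at hs
  · exact Or.inr (by simp)
  · have hcard : (pvU a b).card = (a + 1).toNat * (b + 1).toNat := by
      simp [pvU, Finset.card_product, Int.card_Icc]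
    have hmul : ((a + 1) * (b + 1)).toNat = (a + 1).toNat * (b + 1).toNat := by
      rw [show (a + 1) * (b + 1) = (((a + 1).toNat * (b + 1).toNat : Nat) : Int) from by
        push_cast
        rw [Int.toNat_of_nonneg (show (0 : Int) ≤ a + 1 by omega),
          Int.toNat_of_nonneg (show (0 : Int) ≤ b + 1 by omega)], Int.toNat_natCast]
    simp only [PySem.Set.empty, List.toFinset_nil, Finset.sdiff_empty, List.length_singleton,
      hcard, hmul]
    omega

theorem pvGcdLoop_eq_aux :
    ∀ (n : Nat) (x y : Int), y.natAbs ≤ n → 0 ≤ x → 0 ≤ y →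
      pvGcdLoop x y = (Int.gcd x y : Int) := by
  intro n
  induction n with
  | zero =>
    intro x y hn hx hy
    have hy0 : y = 0 := by omega
    subst hy0
    rw [pvGcdLoop, dif_pos rfl, Int.gcd_zero_right]
    exact (Int.natAbs_of_nonneg hx).symm
  | succ n ih =>
    intro x y hn hx hy
    by_cases hy0 : y = 0
    · subst hy0
      rw [pvGcdLoop, dif_pos rfl, Int.gcd_zero_right]
      exact (Int.natAbs_of_nonneg hx).symm
    · have hy' : 0 < y := by omega
      rw [pvGcdLoop, dif_neg hy0, PySem.Int.mod_eq_emod_of_pos hy']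
      have hlt : (x % y).natAbs < y.natAbs := by
        have h1 := Int.emod_nonneg x hy0
        have h2 := Int.emod_lt_of_pos x hy'
        omega
      rw [ih y (x % y) (by omega) hy (Int.emod_nonneg x hy0)]
      rw [Int.gcd_comm y, Int.gcd_emod]

theorem pvGcdLoop_eq (x y : Int) (hx : 0 ≤ x) (hy : 0 ≤ y) :
    pvGcdLoop x y = (Int.gcd x y : Int) := by
  exact pvGcdLoop_eq_aux y.natAbs x y le_rfl hx hy

theorem pvAlt_iff {a b t : Int} (ha : 0 ≤ a) (hb : 0 ≤ b) :
    (water_jug_alt a b t = true ↔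
      (t = 0 ∨ (0 < t ∧ t ≤ max a b ∧ (Int.gcd a b : Int) ∣ t))) := by
  unfold water_jug_alt
  rw [pvGcdLoop_eq a b ha hb]
  by_cases ht : t = 0
  · simp [ht]
  · rw [if_neg ht]
    simp only [Bool.and_eq_true, decide_eq_true_eq, beq_iff_eq,
      PySem.Int.mod_eq_zero_iff_dvd]
    constructor
    · rintro ⟨⟨h1, h2⟩, h3⟩
      exact Or.inr ⟨h1, h2, h3⟩
    · rintro (h | ⟨h1, h2, h3⟩)
      · exact absurd h ht
      · exact ⟨⟨h1, h2⟩, h3⟩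

-- ===== VERDICT (by name: the statement is the Claim_ definition above) =====
theorem water_jug_spec : Claim_equal_water_jug := by
  intro a b t _ hpre
  obtain ⟨ha, hb⟩ := hpre
  unfold Spec_water_jug
  rw [Bool.eq_iff_iff, pvWater_jug_iff ha hb, pvAlt_iff ha hb]
  constructor
  · rintro ⟨s, hs, hc⟩
    by_cases ht : t = 0
    · exact Or.inl ht
    · have hbd := pvReach_bounds ha hb hs
      have hdv := pvReach_dvd hs
      rcases hc with rfl | rfl
      · exact Or.inr ⟨by omega, by omega, hdv.1⟩
      · exact Or.inr ⟨by omega, by omega, hdv.2⟩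
  · rintro (rfl | ⟨ht0, hmax, hg⟩)
    · exact ⟨(0, 0), Relation.ReflTransGen.refl, Or.inl rfl⟩
    · exact pvComplete ha hb ht0 hmax hg
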